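-- pv_equiv track=rewrite | github.com/cristobalengine115/InteligenciaArtificial | T2/tarea2.py | decodificar_palabra
-- ===== SOURCE A (Python) =====
-- def decodificar_letra(par_num):
--     '''Takes a number that represents the coded letter,returns the letter asociated with that number.'''
--     if par_num == '90':
--         return 'A'
--     elif par_num == '91':
--         return 'B'
--     elif par_num == '92':
--         return 'C'
--     elif par_num == '93':
--         return 'D'
--     elif par_num == '94':
--         return 'E'
--     elif par_num == '80':
--         return 'F'
--     elif par_num == '81':
--         return 'G'
--     elif par_num == '82':
--         return 'H'
--     elif par_num == '83':
--         return '[I/J]'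
--     elif par_num == '84':
--         return 'K'
--     elif par_num == '70':
--         return 'L'
--     elif par_num == '71':
--         return 'M'
--     elif par_num == '72':
--         return 'N'
--     elif par_num == '73':
--         return 'O'
--     elif par_num == '74':
--         return 'P'
--     elif par_num == '60':
--         return 'Q'
--     elif par_num == '61':
--         return 'R'
--     elif par_num == '62':
--         return 'S'
--     elif par_num == '63':
--         return 'T'
--     elif par_num == '64':
--         return 'U'
--     elif par_num == '50':
--         return 'V'
--     elif par_num == '51':
--         return 'W'
--     elif par_num == '52':
--         return 'X'
--     elif par_num == '53':
--         return 'Y'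
--     elif par_num == '54':
--         return 'Z'
--     else:
--         return None
--
-- def decodificar_palabra(code):
--     '''Takes the coded word and prints it. Returns None if the coded word is invalid'''
--     if(not(code.isnumeric() and len(code)%2 == 0)):
--         return None
--     palabra_decodificada = ''
--     for i in range(len(code)):
--         if(i%2 == 0):
--             if(decodificar_letra(code[i:i+2]) == None):
--                 return None
--             else:
--                 palabra_decodificada += str(decodificar_letra(code[i:i+2]))
--         else:
--             pass
--     return palabra_decodificada
-- ===== SOURCE B (Python) =====
-- def _decode_pairs(cs):
--     """Recursively decode two characters at a time; None if a pair is invalid."""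
--     if not cs:
--         return ''
--     a, b = cs[0], cs[1]
--     if a not in '56789' or b not in '01234':
--         return None
--     idx = (9 - int(a)) * 5 + int(b)
--     letter = '[I/J]' if idx == 8 else chr(65 + idx) if idx < 8 else chr(66 + idx)
--     rest = _decode_pairs(cs[2:])
--     return None if rest is None else letter + rest
--
-- def decodificar_palabra(code):
--     if not (code.isnumeric() and len(code) % 2 == 0):
--         return None
--     return _decode_pairs(code)
-- ===== Notes on version B (the rewrite author's own statement) =====
-- stated objective: simpler
-- what changed: Replaced A's 25-branch if/elif letter table and skip-odd-index loop over all positions by a recursive decoder that consumes two characters at a time and computes the letter with the arithmetic formula (9-int(a))*5+int(b).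
import Mathlib
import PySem

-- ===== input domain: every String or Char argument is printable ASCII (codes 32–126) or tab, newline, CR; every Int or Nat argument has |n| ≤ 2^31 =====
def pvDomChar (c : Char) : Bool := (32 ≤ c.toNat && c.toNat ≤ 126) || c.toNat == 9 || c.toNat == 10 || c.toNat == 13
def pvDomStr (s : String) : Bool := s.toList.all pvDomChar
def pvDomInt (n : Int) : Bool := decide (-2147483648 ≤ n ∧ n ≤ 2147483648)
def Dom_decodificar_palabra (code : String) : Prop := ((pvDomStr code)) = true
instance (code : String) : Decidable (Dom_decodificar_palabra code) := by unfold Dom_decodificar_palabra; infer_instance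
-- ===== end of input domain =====

-- B replaces A's 25-branch letter table and skip-odd-index loop by a recursive
-- two-characters-at-a-time decoder with an arithmetic letter formula (objective: simpler).
-- `code.isnumeric()` is ported as PySem.Str.strIsdigit, exact on the ASCII domain.

-- ===== PORT A =====
def decodificar_letra (par : List Char) : Option String :=
  if par = ['9','0'] then some "A"
  else if par = ['9','1'] then some "B"
  else if par = ['9','2'] then some "C"
  else if par = ['9','3'] then some "D"
  else if par = ['9','4'] then some "E"
  else if par = ['8','0'] then some "F"
  else if par = ['8','1'] then some "G"
  else if par = ['8','2'] then some "H"
  else if par = ['8','3'] then some "[I/J]"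
  else if par = ['8','4'] then some "K"
  else if par = ['7','0'] then some "L"
  else if par = ['7','1'] then some "M"
  else if par = ['7','2'] then some "N"
  else if par = ['7','3'] then some "O"
  else if par = ['7','4'] then some "P"
  else if par = ['6','0'] then some "Q"
  else if par = ['6','1'] then some "R"
  else if par = ['6','2'] then some "S"
  else if par = ['6','3'] then some "T"
  else if par = ['6','4'] then some "U"
  else if par = ['5','0'] then some "V"
  else if par = ['5','1'] then some "W"
  else if par = ['5','2'] then some "X"
  else if par = ['5','3'] then some "Y"
  else if par = ['5','4'] then some "Z"
  else none

-- the for-loop of A: iterate i over the index list, skip odd i, early-return none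
def pvLoopA (cs : List Char) : List Nat → List Char → Option (List Char)
  | [], acc => some acc
  | i :: rest, acc =>
    if i % 2 = 0 then
      match decodificar_letra (PySem.List.slice cs (some (i : Int)) (some ((i : Int) + 2))) with
      | none => none
      | some l => pvLoopA cs rest (acc ++ l.toList)
    else pvLoopA cs rest acc

def decodificar_palabra (code : String) : Option String :=
  if ¬(PySem.Str.strIsdigit code = true ∧ code.toList.length % 2 = 0) then none
  else (pvLoopA code.toList (List.range code.toList.length) []).map String.ofList

-- ===== PORT B =====
def pvDigit (c : Char) : Int := (c.toNat : Int) - 48   -- int(c) for a digit character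

def pvLetterOf (idx : Int) : List Char :=
  if idx = 8 then "[I/J]".toList
  else if idx < 8 then [Char.ofNat (65 + idx).toNat]
  else [Char.ofNat (66 + idx).toNat]

-- Source B's _decode_pairs; the single-character case is unreachable under the even-length
-- guard (Python would raise IndexError there)
def pvDecodePairs : List Char → Option (List Char)
  | [] => some []
  | [_] => none
  | a :: b :: rest =>
    if a ∈ (['5','6','7','8','9'] : List Char) ∧ b ∈ (['0','1','2','3','4'] : List Char) then
      match pvDecodePairs rest with
      | none => none
      | some r => some (pvLetterOf ((9 - pvDigit a) * 5 + pvDigit b) ++ r)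
    else none

def decodificar_palabra_alt (code : String) : Option String :=
  if ¬(PySem.Str.strIsdigit code = true ∧ code.toList.length % 2 = 0) then none
  else (pvDecodePairs code.toList).map String.ofList

-- ===== PRECONDITION & SPEC =====
def Spec_decodificar_palabra (code : String) (out : Option String) : Prop := out = decodificar_palabra_alt code
instance (code : String) (out : Option String) : Decidable (Spec_decodificar_palabra code out) := by unfold Spec_decodificar_palabra; infer_instance

-- ===== CLAIM (what is proved, stated in full; the proofs are below) =====
def Claim_equal_decodificar_palabra : Prop := ∀ (code : String), Dom_decodificar_palabra code → Spec_decodificar_palabra code (decodificar_palabra code)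

-- ===== LEMMAS AND PROOFS =====

-- A's table agrees with B's formula on every pair of characters
lemma pvPairEq (a b : Char) :
    (decodificar_letra [a, b]).map String.toList =
      (if a ∈ (['5','6','7','8','9'] : List Char) ∧ b ∈ (['0','1','2','3','4'] : List Char) then
        some (pvLetterOf ((9 - pvDigit a) * 5 + pvDigit b)) else none) := by
  by_cases ha : a ∈ (['5','6','7','8','9'] : List Char)
  · by_cases hb : b ∈ (['0','1','2','3','4'] : List Char)
    · simp only [List.mem_cons, List.not_mem_nil, or_false] at ha hb
      rcases ha with rfl | rfl | rfl | rfl | rfl <;>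
        rcases hb with rfl | rfl | rfl | rfl | rfl <;> decide
    · simp only [List.mem_cons, List.not_mem_nil, or_false, not_or] at hb
      obtain ⟨h0, h1, h2, h3, h4⟩ := hb
      simp [decodificar_letra, h0, h1, h2, h3, h4]
  · simp only [List.mem_cons, List.not_mem_nil, or_false, not_or] at ha
    obtain ⟨h5, h6, h7, h8, h9⟩ := ha
    simp [decodificar_letra, h5, h6, h7, h8, h9]

lemma pvLoopEq (m : Nat) : ∀ (cs : List Char) (k : Nat) (acc : List Char),
    k ≤ cs.length → cs.length - k = 2 * m → k % 2 = 0 →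
    pvLoopA cs (List.range' k (2 * m)) acc =
      Option.map (fun r => acc ++ r) (pvDecodePairs (cs.drop k)) := by
  induction m with
  | zero =>
    intro cs k acc hk hlen _
    have : cs.drop k = [] := List.drop_eq_nil_of_le (by omega)
    simp [this, pvLoopA, pvDecodePairs]
  | succ m ih =>
    intro cs k acc hk hlen hke
    have hk2 : k + 2 ≤ cs.length := by omega
    obtain ⟨a, d1, hd1⟩ : ∃ a d1, cs.drop k = a :: d1 := by
      cases h : cs.drop k with
      | nil => exfalso; have := List.length_drop (l := cs) (i := k); rw [h] at this; simp at this; omega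
      | cons a d1 => exact ⟨a, d1, rfl⟩
    obtain ⟨b, d2, hd2⟩ : ∃ b d2, d1 = b :: d2 := by
      cases h : d1 with
      | nil => exfalso
               have := List.length_drop (l := cs) (i := k)
               rw [hd1, h] at this; simp at this; omega
      | cons b d2 => exact ⟨b, d2, rfl⟩
    have hslice : PySem.List.slice cs (some (k : Int)) (some ((k : Int) + 2)) = [a, b] := by
      have h2 : ((2 : Nat) : Int) = (2 : Int) := by norm_num
      rw [← h2, PySem.List.slice_natCast_add, hd1, hd2]
      rfl
    have hdrop2 : cs.drop (k + 2) = d2 := by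
      rw [← List.drop_drop, hd1, hd2]; rfl
    have hrange : List.range' k (2 * (m + 1)) = k :: (k + 1) :: List.range' (k + 2) (2 * m) := by
      have : 2 * (m + 1) = (2 * m) + 1 + 1 := by ring
      rw [this, List.range'_succ, List.range'_succ]
    rw [hrange]
    have hmap := pvPairEq a b
    simp only [pvLoopA, hslice]
    have hodd : ¬ ((k + 1) % 2 = 0) := by omega
    by_cases hab : a ∈ (['5','6','7','8','9'] : List Char) ∧ b ∈ (['0','1','2','3','4'] : List Char)
    · rw [if_pos hab] at hmap
      obtain ⟨l, hl, hl2⟩ : ∃ l, decodificar_letra [a, b] = some l ∧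
          l.toList = pvLetterOf ((9 - pvDigit a) * 5 + pvDigit b) := by
        cases h : decodificar_letra [a, b] with
        | none => rw [h] at hmap; simp at hmap
        | some l => rw [h] at hmap; simp at hmap; exact ⟨l, rfl, hmap⟩
      rw [hl]
      simp only [hke, hodd]
      rw [ih cs (k + 2) (acc ++ l.toList) hk2 (by omega) (by omega), hdrop2]
      rw [hd1, hd2]
      simp only [pvDecodePairs, if_pos hab]
      cases pvDecodePairs d2 <;> simp [hl2, List.append_assoc]
    · rw [if_neg hab] at hmap
      have : decodificar_letra [a, b] = none := by
        cases h : decodificar_letra [a, b] with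
        | none => rfl
        | some l => rw [h] at hmap; simp at hmap
      rw [this]
      simp only [hke]
      rw [hd1, hd2]
      rw [show pvDecodePairs (a :: b :: d2) = if (a ∈ (['5','6','7','8','9'] : List Char) ∧ b ∈ (['0','1','2','3','4'] : List Char)) then (match pvDecodePairs d2 with | none => none | some r => some (pvLetterOf ((9 - pvDigit a) * 5 + pvDigit b) ++ r)) else none from rfl, if_neg hab]; rfl

-- ===== VERDICT (by name: the statement is the Claim_ definition above) =====
theorem decodificar_palabra_spec : Claim_equal_decodificar_palabra := by
  intro code _
  unfold Spec_decodificar_palabra decodificar_palabra decodificar_palabra_alt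
  by_cases h : PySem.Str.strIsdigit code = true ∧ code.toList.length % 2 = 0
  · rw [if_neg (not_not_intro h), if_neg (not_not_intro h)]
    obtain ⟨m, hm⟩ : ∃ m, code.toList.length = 2 * m := ⟨code.toList.length / 2, by omega⟩
    have := pvLoopEq m code.toList 0 [] (Nat.zero_le _) (by omega) rfl
    rw [List.range_eq_range', hm, this]
    simp
  · rw [if_pos h, if_pos h]
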